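-- pv_equiv track=rewrite | github.com/Joffref/TP_GLA | Testing/Exo3/exercises.py | get_3mer_usage_chart
-- ===== SOURCE A (Python) =====
-- def get_3mer_usage_chart(s):
--     """
--     This routine implements a 'sliding window'
--     and extracts all possible consecutive 3-mers.
--     It counts how often they appear and returns
--     a list of tuples with (name, occurrence).
--     The list is alphabetically sorted by the name
--     of the 3-mer.
--     """
--     triplets = []
--     for i in range(0, len(s) - 2):
--         present = False
--         for el in triplets:
--             if el[0] == s[i:i + 3]:
--                 el[1] += 1
--                 present = True
--                 break
--         if not present:
--             triplets.append([s[i:i + 3], 1])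
--
--     triplets.sort()
--     cleanedTriplets = []
--     for el in triplets:
--         cleanedTriplets.append((el[0], el[1]))
--
--     return cleanedTriplets
-- ===== SOURCE B (Python) =====
-- def get_3mer_usage_chart(s):
--     mers = sorted(s[i:i + 3] for i in range(len(s) - 2))
--     chart = []
--     for m in mers:
--         if chart and chart[-1][0] == m:
--             chart[-1] = (m, chart[-1][1] + 1)
--         else:
--             chart.append((m, 1))
--     return chart
-- ===== Notes on version B (the rewrite author's own statement) =====
-- stated objective: faster
-- what changed: Replaces the quadratic scan-accumulated-list-per-window counter with sort-then-run-length-encode: the sorted 3-mer list is walked once, each run emitting one (mer, count) tuple, so no membership scan of accumulated results and no final sort of pairs is needed.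
import Mathlib
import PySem

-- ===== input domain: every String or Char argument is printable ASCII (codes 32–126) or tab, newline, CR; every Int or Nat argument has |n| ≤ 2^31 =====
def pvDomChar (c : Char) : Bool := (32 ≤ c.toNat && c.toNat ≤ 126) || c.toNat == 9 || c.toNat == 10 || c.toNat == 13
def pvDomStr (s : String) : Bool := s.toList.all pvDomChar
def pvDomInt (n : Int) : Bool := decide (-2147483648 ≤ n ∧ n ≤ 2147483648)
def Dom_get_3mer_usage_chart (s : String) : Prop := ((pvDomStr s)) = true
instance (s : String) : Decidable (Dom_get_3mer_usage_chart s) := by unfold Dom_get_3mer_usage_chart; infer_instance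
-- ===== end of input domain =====

-- B replaces A's quadratic scan-the-accumulated-list counter with sort-then-run-length-encode
-- (one pass over the sorted 3-mer list); same return value, proved equal below.

-- ===== PORT A =====
-- inner 'for el in triplets: …' scan with increment-on-first-match, else append [mer, 1]
def pvBump (acc : List (String × Int)) (m : String) : List (String × Int) :=
  match acc with
  | [] => [(m, 1)]
  | (k, c) :: t => if k == m then (k, c + 1) :: t else (k, c) :: pvBump t m

def get_3mer_usage_chart (s : String) : List (String × Int) :=
  let triplets := (PySem.List.pyRange 0 (PySem.Str.len s - 2)).foldl
      (fun acc i => pvBump acc (PySem.Str.slice s (some i) (some (i + 3)))) []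
  -- triplets.sort(): Python compares the [name, count] lists lexicographically = tuple key (fst, snd)
  let sortedT := PySem.List.sorted2 triplets Prod.fst Prod.snd
  sortedT.foldl (fun acc el => acc ++ [(el.1, el.2)]) []

-- ===== PORT B =====
-- one run-length step: 'if chart and chart[-1][0] == m: chart[-1] = (m, chart[-1][1]+1) else: chart.append((m,1))'
def pvRle (acc : List (String × Int)) (m : String) : List (String × Int) :=
  match acc.getLast? with
  | some last => if last.1 == m then acc.dropLast ++ [(m, last.2 + 1)] else acc ++ [(m, 1)]
  | none => acc ++ [(m, 1)]

def get_3mer_usage_chart_alt (s : String) : List (String × Int) :=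
  let mers := PySem.List.sorted ((PySem.List.pyRange 0 (PySem.Str.len s - 2)).map
      (fun i => PySem.Str.slice s (some i) (some (i + 3)))) (fun x => x)
  mers.foldl pvRle []

-- ===== PRECONDITION & SPEC =====
def Spec_get_3mer_usage_chart (s : String) (out : List (String × Int)) : Prop := out = get_3mer_usage_chart_alt s
instance (s : String) (out : List (String × Int)) : Decidable (Spec_get_3mer_usage_chart s out) := by unfold Spec_get_3mer_usage_chart; infer_instance

-- ===== CLAIM (what is proved, stated in full; the proofs are below) =====
def Claim_equal_get_3mer_usage_chart : Prop := ∀ (s : String), Dom_get_3mer_usage_chart s → Spec_get_3mer_usage_chart s (get_3mer_usage_chart s)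

-- ===== LEMMAS AND PROOFS =====

-- the canonical chart of a list of mers: first-occurrence-ordered distinct keys with their counts
theorem pv_ofList_append (l : List String) (x : String) :
    PySem.Set.ofList (l ++ [x]) = (PySem.Set.ofList l).add x := by
  unfold PySem.Set.ofList; rw [List.foldl_append]; rfl

theorem pv_dedup_append_mem (l : List String) (x : String) (h : x ∈ l) :
    PySem.List.dedup (l ++ [x]) = PySem.List.dedup l := by
  unfold PySem.List.dedup
  rw [pv_ofList_append]
  unfold PySem.Set.add
  have : (PySem.Set.ofList l).contains x = true := by
    simp [PySem.Set.contains]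
    exact h
  rw [this]; simp

theorem pv_dedup_append_not_mem (l : List String) (x : String) (h : x ∉ l) :
    PySem.List.dedup (l ++ [x]) = PySem.List.dedup l ++ [x] := by
  unfold PySem.List.dedup
  rw [pv_ofList_append]
  unfold PySem.Set.add
  have : (PySem.Set.ofList l).contains x = false := by
    simp [PySem.Set.contains]

    exact h
  rw [this]; simp

theorem pv_dedup_sublist (l : List String) : (PySem.List.dedup l).Sublist l := by
  induction l using List.reverseRecOn with
  | nil => simp [PySem.List.dedup, PySem.Set.ofList, PySem.Set.empty]
  | append_singleton t x ih =>
    by_cases hx : x ∈ t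
    · rw [pv_dedup_append_mem t x hx]
      exact ih.trans (List.sublist_append_left t [x])
    · rw [pv_dedup_append_not_mem t x hx]
      exact List.Sublist.append ih (List.Sublist.refl [x])

def pvCnt (l : List String) : List (String × Int) :=
  (PySem.List.dedup l).map (fun m => (m, (l.count m : Int)))

theorem pv_bump_map_not_mem (ks : List String) (g : String → Int) (x : String) (h : x ∉ ks) :
    pvBump (ks.map (fun m => (m, g m))) x = ks.map (fun m => (m, g m)) ++ [(x, 1)] := by
  induction ks with
  | nil => rfl
  | cons k t ih =>
    have hk : ¬ (k == x) = true := by simp; rintro rfl; exact h (List.mem_cons_self)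
    simp only [List.map_cons, pvBump, hk, Bool.false_eq_true, if_false, List.cons_append]
    rw [ih (fun hm => h (List.mem_cons_of_mem _ hm))]

theorem pv_bump_map_mem (ks : List String) (g : String → Int) (x : String)
    (nd : ks.Nodup) (h : x ∈ ks) :
    pvBump (ks.map (fun m => (m, g m))) x
      = ks.map (fun m => (m, if m = x then g m + 1 else g m)) := by
  induction ks with
  | nil => exact absurd h (List.not_mem_nil)
  | cons k t ih =>
    rcases List.mem_cons.1 h with rfl | hx
    · have hxt : x ∉ t := (List.nodup_cons.1 nd).1
      simp only [List.map_cons, pvBump, beq_self_eq_true, if_true]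
      congr 1
      apply List.map_congr_left
      intro m hm
      have : m ≠ x := fun he => hxt (he ▸ hm)
      simp [this]
    · have hk : ¬ (k == x) = true := by
        simp; rintro rfl; exact (List.nodup_cons.1 nd).1 hx
      have hkx : k ≠ x := by simpa using hk
      simp only [List.map_cons, pvBump, hk, Bool.false_eq_true, if_false, hkx]
      rw [ih (List.nodup_cons.1 nd).2 hx]

theorem pv_foldl_bump_eq_cnt (l : List String) : l.foldl pvBump [] = pvCnt l := by
  induction l using List.reverseRecOn with
  | nil => rfl
  | append_singleton t x ih =>
    rw [List.foldl_append, List.foldl_cons, List.foldl_nil, ih]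
    unfold pvCnt
    by_cases hx : x ∈ t
    · rw [pv_bump_map_mem _ _ _ (PySem.List.nodup_dedup t) ((PySem.List.mem_dedup t x).2 hx),
        pv_dedup_append_mem t x hx]
      apply List.map_congr_left
      intro m hm
      simp only [List.count_append, List.count_singleton]
      by_cases hmx : m = x
      · subst hmx; simp
      · simp [hmx, Ne.symm hmx, beq_iff_eq]
    · rw [pv_bump_map_not_mem _ _ _ (fun hc => hx ((PySem.List.mem_dedup t x).1 hc)),
        pv_dedup_append_not_mem t x hx]
      rw [List.map_append]
      congr 1
      · apply List.map_congr_left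
        intro m hm
        have hmx : m ≠ x := fun he => hx (he ▸ (PySem.List.mem_dedup t m).1 hm)
        simp [List.count_append, Ne.symm hmx]
      · simp [List.count_append, List.count_eq_zero.2 hx]

theorem pv_dedup_pairwise_lt (l : List String) (h : l.Pairwise (· ≤ ·)) :
    (PySem.List.dedup l).Pairwise (· < ·) := by
  have h1 : (PySem.List.dedup l).Pairwise (· ≤ ·) :=
    List.Pairwise.sublist (pv_dedup_sublist l) h
  have h2 : (PySem.List.dedup l).Pairwise (· ≠ ·) := PySem.List.nodup_dedup l
  exact (h1.and h2).imp (fun hab => lt_of_le_of_ne hab.1 hab.2)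

theorem pv_last_of_pairwise_lt (l : List String) (x : String) (h : l.Pairwise (· < ·))
    (hx : x ∈ l) (hmax : ∀ y ∈ l, y ≤ x) : l.getLast? = some x := by
  induction l with
  | nil => exact absurd hx (List.not_mem_nil)
  | cons a t ih =>
    match t, hx with
    | [], hx => simp_all
    | b :: u, hx =>
      have hpt := (List.pairwise_cons.1 h).2
      have hxt : x ∈ b :: u := by
        rcases List.mem_cons.1 hx with rfl | hxt
        · exact absurd (hmax b (by simp)) (not_le.2 ((List.pairwise_cons.1 h).1 b (by simp)))
        · exact hxt
      rw [List.getLast?_cons_cons]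
      exact ih hpt hxt (fun y hy => hmax y (List.mem_cons_of_mem _ hy))

theorem pv_rle_step (t : List String) (x : String) (hs : t.Pairwise (· ≤ ·))
    (hmax : ∀ y ∈ t, y ≤ x) : pvRle (pvCnt t) x = pvCnt (t ++ [x]) := by
  rcases eq_or_ne t [] with rfl | ht
  · simp [pvRle, pvCnt, PySem.List.dedup, PySem.Set.ofList, PySem.Set.empty,
      PySem.Set.add, PySem.Set.contains]
  have hd : PySem.List.dedup t ≠ [] := by
    rcases List.exists_mem_of_ne_nil t ht with ⟨y, hy⟩
    intro he
    exact absurd ((PySem.List.mem_dedup t y).2 hy) (he ▸ List.not_mem_nil)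
  by_cases hx : x ∈ t
  · -- last key of the chart is x; increment it
    have hlast : (PySem.List.dedup t).getLast? = some x :=
      pv_last_of_pairwise_lt _ x (pv_dedup_pairwise_lt t hs)
        ((PySem.List.mem_dedup t x).2 hx)
        (fun y hy => hmax y ((PySem.List.mem_dedup t y).1 hy))
    rcases List.getLast?_eq_some_iff.1 hlast with ⟨ys, hys⟩
    have hxD : x ∉ ys := by
      have hnd := PySem.List.nodup_dedup t
      rw [hys] at hnd
      exact fun hc => (List.disjoint_of_nodup_append hnd) hc (by simp)
    unfold pvRle pvCnt
    rw [List.getLast?_map, hlast]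
    simp only [Option.map_some, beq_self_eq_true, if_true]
    rw [pv_dedup_append_mem t x hx]
    simp only [hys, List.map_append, List.map_cons, List.map_nil, List.dropLast_concat]
    congr 1
    · apply List.map_congr_left
      intro m hm
      have hmx : m ≠ x := fun he => hxD (he ▸ hm)
      simp [List.count_append, Ne.symm hmx]
    · simp [List.count_append]
  · -- new key: append (x, 1)
    have hlast : ∃ m0, (PySem.List.dedup t).getLast? = some m0 ∧ m0 ≠ x := by
      refine ⟨(PySem.List.dedup t).getLast hd, List.getLast?_eq_some_getLast hd, fun he => hx ?_⟩
      exact (PySem.List.mem_dedup t x).1 (he ▸ List.getLast_mem hd)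
    rcases hlast with ⟨m0, hm0, hm0x⟩
    unfold pvRle pvCnt
    rw [List.getLast?_map, hm0]
    simp only [Option.map_some]
    rw [if_neg (by simpa using hm0x)]
    rw [pv_dedup_append_not_mem t x hx, List.map_append]
    congr 1
    · apply List.map_congr_left
      intro m hm
      have hmx : m ≠ x := fun he => hx (he ▸ (PySem.List.mem_dedup t m).1 hm)
      simp [List.count_append, Ne.symm hmx]
    · simp [List.count_append, List.count_eq_zero.2 hx]

theorem pv_foldl_rle_eq_cnt (t : List String) (hs : t.Pairwise (· ≤ ·)) :
    t.foldl pvRle [] = pvCnt t := by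
  induction t using List.reverseRecOn with
  | nil => rfl
  | append_singleton u x ih =>
    have h := List.pairwise_append.1 hs
    rw [List.foldl_append, List.foldl_cons, List.foldl_nil, ih h.1,
      pv_rle_step u x h.1 (fun y hy => h.2.2 y hy x (by simp))]

theorem pv_insertBy_congr (x : String × Int) (acc : List (String × Int))
    (h : ∀ a ∈ acc, a.1 ≠ x.1) :
    PySem.List.insertBy
        (fun a b => decide (a.1 < b.1) || !decide (b.1 < a.1) && decide (a.2 < b.2)) x acc
      = PySem.List.insertBy (fun a b => decide (a.1 < b.1)) x acc := by
  induction acc with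
  | nil => rfl
  | cons y t ih =>
    have hyx : y.1 ≠ x.1 := h y (by simp)
    unfold PySem.List.insertBy
    have : (decide (x.1 < y.1) || !decide (y.1 < x.1) && decide (x.2 < y.2))
        = decide (x.1 < y.1) := by
      rcases lt_or_gt_of_ne (Ne.symm hyx) with hlt | hgt
      · simp [hlt, not_lt_of_gt hlt]
      · simp [hgt, not_lt_of_gt hgt]
    rw [this]
    split_ifs with hc
    · rfl
    · exact congrArg (y :: ·) (ih (fun a ha => h a (List.mem_cons_of_mem _ ha)))

theorem pv_sorted2_eq_sorted_fst (xs : List (String × Int))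
    (nd : xs.Pairwise (fun a b => a.1 ≠ b.1)) :
    PySem.List.sorted2 xs Prod.fst Prod.snd = PySem.List.sorted xs Prod.fst := by
  show xs.foldl (fun acc x => PySem.List.insertBy _ x acc) []
      = xs.foldl (fun acc x => PySem.List.insertBy _ x acc) []
  suffices h : ∀ (xs : List (String × Int)) (acc : List (String × Int)),
      xs.Pairwise (fun a b => a.1 ≠ b.1) → (∀ x ∈ xs, ∀ a ∈ acc, a.1 ≠ x.1) →
      xs.foldl (fun acc x => PySem.List.insertBy
        (fun a b => decide (a.1 < b.1) || !decide (b.1 < a.1) && decide (a.2 < b.2)) x acc) acc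
      = xs.foldl (fun acc x => PySem.List.insertBy (fun a b => decide (a.1 < b.1)) x acc) acc by
    exact h xs [] nd (by simp)
  intro l
  induction l with
  | nil => intro acc _ _; rfl
  | cons x t ih =>
    intro acc hp hacc
    simp only [List.foldl_cons]
    rw [pv_insertBy_congr x acc (hacc x (by simp))]
    apply ih
    · exact (List.pairwise_cons.1 hp).2
    · intro y hy a ha
      rcases (PySem.List.mem_insertBy _ x a acc).1 ha with rfl | haacc
      · exact (List.pairwise_cons.1 hp).1 y hy
      · exact hacc y (List.mem_cons_of_mem _ hy) a haacc

theorem pv_cnt_pairwise_nodup (l : List String) :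
    (pvCnt l).Pairwise (fun a b => a.1 ≠ b.1) := by
  unfold pvCnt
  rw [List.pairwise_map]
  exact (PySem.List.nodup_dedup l).imp (fun {a b} h => by simpa using h)

theorem pv_cnt_perm (t l : List String) (hp : t.Perm l) : (pvCnt t).Perm (pvCnt l) := by
  unfold pvCnt
  have hc : ∀ m, t.count m = l.count m := fun m => hp.count_eq m
  have h1 : (PySem.List.dedup t).map (fun m => (m, (t.count m : Int)))
      = (PySem.List.dedup t).map (fun m => (m, (l.count m : Int))) := by
    apply List.map_congr_left; intro m _; rw [hc m]
  rw [h1]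
  apply List.Perm.map
  rw [List.perm_ext_iff_of_nodup (PySem.List.nodup_dedup t) (PySem.List.nodup_dedup l)]
  intro a
  rw [PySem.List.mem_dedup, PySem.List.mem_dedup]
  exact ⟨fun h => hp.mem_iff.1 h, fun h => hp.mem_iff.2 h⟩

theorem pv_main (mers : List String) :
    PySem.List.sorted2 (pvCnt mers) Prod.fst Prod.snd
      = (PySem.List.sorted mers (fun x => x)).foldl pvRle [] := by
  have hsm : (PySem.List.sorted mers (fun x => x)).Pairwise (· ≤ ·) := by
    simpa using PySem.List.sorted_pairwise mers (fun x => x)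
  rw [pv_foldl_rle_eq_cnt _ hsm, pv_sorted2_eq_sorted_fst _ (pv_cnt_pairwise_nodup mers)]
  apply PySem.List.sorted_eq_of_perm_of_pairwise_lt
  · exact pv_cnt_perm _ _ (PySem.List.sorted_perm mers (fun x => x) false)
  · unfold pvCnt
    rw [List.pairwise_map]
    exact (pv_dedup_pairwise_lt _ hsm).imp (fun {a b} h => h)

-- ===== VERDICT (by name: the statement is the Claim_ definition above) =====
theorem get_3mer_usage_chart_spec : Claim_equal_get_3mer_usage_chart := by
  intro s _
  unfold Spec_get_3mer_usage_chart get_3mer_usage_chart get_3mer_usage_chart_alt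
  rw [PySem.List.foldl_append_singleton_eq_map, List.nil_append,
    show (fun acc i => pvBump acc (PySem.Str.slice s (some i) (some (i + 3))))
        = fun acc i => pvBump acc ((fun i => PySem.Str.slice s (some i) (some (i + 3))) i) from rfl,
    ← List.foldl_map, pv_foldl_bump_eq_cnt, pv_main]
  simp
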